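-- pv_equiv track=rewrite | github.com/KITKATXU/DFG-C2Rust | code_analyzer_global.py | compress_multiline_code
-- ===== SOURCE A (Python) =====
-- def compress_multiline_code(lines):
--     result = []
--     i = 0
--     while i < len(lines):
--         current_line = lines[i].rstrip('\n')
--         current_line_strip = current_line.strip()
--
--         # Skip empty lines and comments
--         if not current_line_strip or current_line_strip.startswith('//') or current_line_strip.startswith('/*'):
--             result.append(current_line)
--             i += 1
--             continue
--
--         # Check for line continuation
--         if current_line_strip.endswith('\\'):
--             combined_line = current_line_strip[:-1]
--             j = i + 1
--             while j < len(lines) and lines[j].strip().endswith('\\'):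
--                 combined_line += ' ' + lines[j].strip()[:-1]
--                 j += 1
--             if j < len(lines):
--                 combined_line += ' ' + lines[j].strip()
--             result.append(combined_line)
--             i = j + 1
--         # Check for assignment continuation
--         elif current_line_strip.endswith('='):
--             if i + 1 < len(lines):
--                 next_line = lines[i + 1].strip()
--                 if not next_line.startswith('//'):
--                     result.append(f"{current_line_strip} {next_line}")
--                     i += 2
--                     continue
--             result.append(current_line)
--             i += 1
--         else:
--             result.append(current_line)
--             i += 1
--
--     return '\n'.join(result)
-- ===== SOURCE B (Python) =====
-- def compress_multiline_code(lines):
--     result = []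
--     cont = None    # pending backslash-continuation buffer
--     assign = None  # pending (stripped, rstripped) assignment line awaiting its value line
--     for line in lines:
--         if cont is not None:
--             s = line.strip()
--             if s.endswith('\\'):
--                 cont += ' ' + s[:-1]
--             else:
--                 result.append(cont + ' ' + s)
--                 cont = None
--             continue
--         if assign is not None:
--             s = line.strip()
--             cs0, cur0 = assign
--             assign = None
--             if not s.startswith('//'):
--                 result.append(cs0 + ' ' + s)
--                 continue
--             result.append(cur0)
--             # fall through: process this comment line normally
--         cur = line.rstrip('\n')
--         cs = cur.strip()
--         if not cs or cs.startswith('//') or cs.startswith('/*'):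
--             result.append(cur)
--         elif cs.endswith('\\'):
--             cont = cs[:-1]
--         elif cs.endswith('='):
--             assign = (cs, cur)
--         else:
--             result.append(cur)
--     if cont is not None:
--         result.append(cont)
--     elif assign is not None:
--         result.append(assign[1])
--     return '\n'.join(result)
-- ===== Notes on version B (the rewrite author's own statement) =====
-- stated objective: alternative
-- what changed: Replaced A's index-based while loop with an inner lookahead loop (and index jumps i = j + 1 / i += 2) by a single forward for-pass over the lines that carries a pending-continuation buffer and a pending-assignment pair across iterations, flushing them when the closing line or end-of-file arrives.
import Mathlib
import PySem

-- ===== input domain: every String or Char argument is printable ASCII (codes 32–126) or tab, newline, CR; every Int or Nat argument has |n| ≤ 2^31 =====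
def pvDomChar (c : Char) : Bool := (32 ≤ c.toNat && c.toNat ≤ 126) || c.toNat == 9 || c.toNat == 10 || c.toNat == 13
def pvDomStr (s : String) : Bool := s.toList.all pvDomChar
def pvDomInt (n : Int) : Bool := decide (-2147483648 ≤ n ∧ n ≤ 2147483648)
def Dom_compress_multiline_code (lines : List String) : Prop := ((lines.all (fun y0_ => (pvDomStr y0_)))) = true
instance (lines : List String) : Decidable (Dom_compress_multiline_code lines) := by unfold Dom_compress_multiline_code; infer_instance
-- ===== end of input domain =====

-- B is a single forward pass carrying a pending-continuation/pending-assignment state instead of A's inner lookahead loop (objective: alternative decomposition).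

-- ===== PORT A =====
-- s.rstrip('\n'): hand-ported (PySem.Str.rstrip strips whitespace, Python here strips only '\n');
-- exact: drops exactly the maximal run of trailing '\n' characters.
def pvRstripNl (s : String) : String :=
  String.ofList ((s.toList.reverse.dropWhile (fun c => c == '\n')).reverse)

-- A's inner 'while j < len(lines) and lines[j].strip().endswith("\\")' lookahead, plus the
-- 'if j < len(lines)' consumption of the terminating line; returns (combined_line, unconsumed rest).
def pvInnerA (combined : String) (rest : List String) : String × List String :=
  match rest with
  | [] => (combined, [])
  | l :: rs =>
    let s := PySem.Str.strip l
    if PySem.Str.endswith s "\\" then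
      pvInnerA (combined ++ " " ++ PySem.Str.slice s none (some (-1))) rs
    else
      (combined ++ " " ++ s, rs)

theorem pvInnerA_len (combined : String) (rest : List String) :
    (pvInnerA combined rest).2.length ≤ rest.length := by
  induction rest generalizing combined with
  | nil => simp [pvInnerA]
  | cons l rs ih =>
    simp only [pvInnerA]
    split
    · exact le_trans (ih _) (by simp)
    · simp

-- A's outer 'while i < len(lines)' loop, building result
set_option maxHeartbeats 1000000 in
def pvLoopA (lines : List String) : List String :=
  match lines with
  | [] => []
  | l :: rest =>
    let cur := pvRstripNl l
    let cs := PySem.Str.strip cur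
    if cs == "" || PySem.Str.startswith cs "//" || PySem.Str.startswith cs "/*" then
      cur :: pvLoopA rest
    else if PySem.Str.endswith cs "\\" then
      let p := pvInnerA (PySem.Str.slice cs none (some (-1))) rest
      p.1 :: pvLoopA p.2
    else if PySem.Str.endswith cs "=" then
      match rest with
      | next :: rs =>
        let n := PySem.Str.strip next
        if !(PySem.Str.startswith n "//") then
          (cs ++ " " ++ n) :: pvLoopA rs
        else
          cur :: pvLoopA (next :: rs)
      | [] => cur :: pvLoopA []
    else
      cur :: pvLoopA rest
termination_by lines.length
decreasing_by
  · simp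
  · have := pvInnerA_len (PySem.Str.slice cs none (some (-1))) rest
    simp; omega
  · simp
  · simp
  · simp
  · simp

def compress_multiline_code (lines : List String) : String :=
  PySem.Str.join "\n" (pvLoopA lines)

-- ===== PORT B =====
-- B's single forward pass: cont = pending continuation buffer, assign = pending (stripped, rstripped)
-- assignment line; pvNormalB is the fall-through 'process this line from scratch' body of the loop.
mutual
def pvLoopB (cont : Option String) (assign : Option (String × String)) (lines : List String) : List String :=
  match lines with
  | [] =>
    match cont with
    | some c => [c]
    | none =>
      match assign with
      | some pa => [pa.2]
      | none => []
  | l :: rest =>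
    match cont with
    | some c =>
      let s := PySem.Str.strip l
      if PySem.Str.endswith s "\\" then
        pvLoopB (some (c ++ " " ++ PySem.Str.slice s none (some (-1)))) none rest
      else
        (c ++ " " ++ s) :: pvLoopB none none rest
    | none =>
      match assign with
      | some (cs0, cur0) =>
        let s := PySem.Str.strip l
        if !(PySem.Str.startswith s "//") then
          (cs0 ++ " " ++ s) :: pvLoopB none none rest
        else
          cur0 :: pvNormalB l rest
      | none => pvNormalB l rest
termination_by 2 * lines.length + 1

def pvNormalB (l : String) (rest : List String) : List String :=
  let cur := pvRstripNl l
  let cs := PySem.Str.strip cur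
  if cs == "" || PySem.Str.startswith cs "//" || PySem.Str.startswith cs "/*" then
    cur :: pvLoopB none none rest
  else if PySem.Str.endswith cs "\\" then
    pvLoopB (some (PySem.Str.slice cs none (some (-1)))) none rest
  else if PySem.Str.endswith cs "=" then
    pvLoopB none (some (cs, cur)) rest
  else
    cur :: pvLoopB none none rest
termination_by 2 * rest.length + 2
end

def compress_multiline_code_alt (lines : List String) : String :=
  PySem.Str.join "\n" (pvLoopB none none lines)

-- ===== PRECONDITION & SPEC =====
def Spec_compress_multiline_code (lines : List String) (out : String) : Prop := out = compress_multiline_code_alt lines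
instance (lines : List String) (out : String) : Decidable (Spec_compress_multiline_code lines out) := by unfold Spec_compress_multiline_code; infer_instance

-- ===== CLAIM (what is proved, stated in full; the proofs are below) =====
def Claim_equal_compress_multiline_code : Prop := ∀ (lines : List String), Dom_compress_multiline_code lines → Spec_compress_multiline_code lines (compress_multiline_code lines)

-- ===== LEMMAS AND PROOFS =====

-- B's continuation state computes exactly A's inner lookahead loop
theorem pvLoopB_cont (rest : List String) (c : String) :
    pvLoopB (some c) none rest =
      (pvInnerA c rest).1 :: pvLoopB none none (pvInnerA c rest).2 := by
  induction rest generalizing c with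
  | nil => simp [pvLoopB, pvInnerA]
  | cons l rs ih =>
    simp only [pvLoopB, pvInnerA]
    split
    · exact ih _
    · rfl

theorem pvLoopB_eq_pvLoopA (lines : List String) :
    pvLoopB none none lines = pvLoopA lines := by
  have H : ∀ n (ls : List String), ls.length ≤ n → pvLoopB none none ls = pvLoopA ls := by
    intro n
    induction n with
    | zero =>
      intro ls h
      have : ls = [] := List.eq_nil_of_length_eq_zero (Nat.le_zero.mp h)
      subst this
      simp [pvLoopB, pvLoopA]
    | succ n ih =>
      intro ls h
      match ls with
      | [] => simp [pvLoopB, pvLoopA]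
      | l :: rest =>
        have h' : rest.length ≤ n := by simp only [List.length_cons] at h; omega
        conv_rhs => rw [pvLoopA.eq_def]
        simp only [pvLoopB, pvNormalB]
        split_ifs with h1 h2 h3
        · rw [ih rest h']
        · rw [pvLoopB_cont]
          have hlen := pvInnerA_len
            (PySem.Str.slice (PySem.Str.strip (pvRstripNl l)) none (some (-1))) rest
          rw [ih _ (le_trans hlen h')]
        · match rest with
          | [] => simp [pvLoopB, pvLoopA]
          | next :: rs =>
            simp only [pvLoopB]
            split
            · rw [ih rs (by simp only [List.length_cons] at h'; omega)]
            · show _ :: pvNormalB next rs = _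
              have hB : pvNormalB next rs = pvLoopB none none (next :: rs) := by
                simp only [pvLoopB]
              rw [hB, ih (next :: rs) h']
        · rw [ih rest h']
  exact H lines.length lines le_rfl

-- ===== VERDICT (by name: the statement is the Claim_ definition above) =====
theorem compress_multiline_code_spec : Claim_equal_compress_multiline_code := by
  intro lines _
  unfold Spec_compress_multiline_code compress_multiline_code compress_multiline_code_alt
  rw [pvLoopB_eq_pvLoopA]
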